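-- pv_equiv track=rewrite | github.com/nizhf/hoi-prediction-gaze-transformer | common/model_utils.py | bbox_pair_generation
-- ===== SOURCE A (Python) =====
-- def bbox_pair_generation(bboxes, labels, human_label=0):
--     """
--     From list of bboxes and labels, generate pairs
--
--     Args:
--         bboxes (List[nx5]): object bboxes
--         labels (List[nx1]): object labels
--
--     Returns:
--         pair_idxes, im_idxes
--     """
--     pair_idxes = []
--     im_idxes = []
--     idx_left = 0
--     idx_right = 0
--     last_frame_idx = 0
--     for idx, bbox in enumerate(bboxes):
--         # new frame, process last frame
--         if bbox[0] != last_frame_idx: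
--             idx_right = idx
--             for i_subj in range(idx_left, idx_right):
--                 # human, pair with all other objects
--                 if labels[i_subj] == human_label:
--                     for i_obj in range(idx_left, idx_right):
--                         if i_subj != i_obj:
--                             pair_idxes.append([i_subj, i_obj])
--                             im_idxes.append(last_frame_idx)
--             # set for new frame
--             idx_left = idx
--         last_frame_idx = bbox[0]
--     # add the last frame
--     idx_right = idx + 1
--     for i_subj in range(idx_left, idx_right):
--         # human, pair with all other objects
--         if labels[i_subj] == human_label:
--             for i_obj in range(idx_left, idx_right):
--                 if i_subj != i_obj:
--                     pair_idxes.append([i_subj, i_obj])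
--                     im_idxes.append(last_frame_idx)
--
--     return pair_idxes, im_idxes
-- ===== SOURCE B (Python) =====
-- def bbox_pair_generation(bboxes, labels, human_label=0):
--     """Label each bbox with a run id (incremented whenever bbox[0] changes from
--     the previous row), then build all pairs with one global double
--     comprehension filtered by equal run ids; frame ids are read back from
--     bboxes via the subject index."""
--     n = len(bboxes)
--     run = []
--     rid = -1
--     prev = object()  # sentinel: never equal to a frame id
--     for bbox in bboxes:
--         if bbox[0] != prev:
--             rid += 1
--             prev = bbox[0]
--         run.append(rid)
--     pair_idxes = [[s, o]
--                   for s in range(n) if labels[s] == human_label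
--                   for o in range(n) if run[o] == run[s] and s != o]
--     im_idxes = [bboxes[p[0]][0] for p in pair_idxes]
--     return pair_idxes, im_idxes
-- ===== Notes on version B (the rewrite author's own statement) =====
-- stated objective: alternative
-- what changed: B drops A's segment bookkeeping (idx_left/idx_right/last_frame_idx and the duplicated nested pairing loops) entirely: it labels every row with a consecutive-run id in one pass, then emits all pairs with a single global double comprehension filtered by equal run ids, and reads the frame ids back from bboxes[s][0], instead of pairing inside explicitly delimited index ranges per frame.
-- crash fix: On empty bboxes A raises UnboundLocalError (the loop variable idx is never bound); B returns ([], []). — e.g. on bbox_pair_generation([], [], 0): A raises UnboundLocalError, B returns ([], [])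
import Mathlib
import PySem

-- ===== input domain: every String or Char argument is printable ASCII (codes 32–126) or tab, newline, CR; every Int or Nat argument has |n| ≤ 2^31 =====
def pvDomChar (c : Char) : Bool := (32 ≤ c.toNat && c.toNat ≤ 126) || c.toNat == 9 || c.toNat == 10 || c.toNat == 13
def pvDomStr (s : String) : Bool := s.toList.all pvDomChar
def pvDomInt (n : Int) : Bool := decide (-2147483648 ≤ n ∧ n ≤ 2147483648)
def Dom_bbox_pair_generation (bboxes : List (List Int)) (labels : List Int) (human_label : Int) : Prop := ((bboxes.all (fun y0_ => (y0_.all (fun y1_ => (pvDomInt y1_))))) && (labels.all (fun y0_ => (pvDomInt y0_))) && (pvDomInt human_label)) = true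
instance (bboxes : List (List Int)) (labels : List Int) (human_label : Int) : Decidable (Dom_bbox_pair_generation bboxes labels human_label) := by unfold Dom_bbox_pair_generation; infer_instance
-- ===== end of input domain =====

-- B replaces A's segment bookkeeping (idx_left / last_frame_idx, the nested pairing
-- loops written twice) by a run-id labelling pass plus ONE global double loop over all
-- index pairs filtered by equal run ids; objective: alternative. No speed claim.

-- ===== PORT A =====
-- A's inline nested pairing loops (the Python writes them twice; helper here), acc = (pair_idxes, im_idxes):
-- for i_subj in range(l, r): if labels[i_subj]==human_label: for i_obj in range(l, r): if i_subj != i_obj: append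
def pairLoopA (labels : List Int) (human_label l r k : Int)
    (acc : List (List Int) × List Int) : List (List Int) × List Int :=
  (PySem.List.pyRange l r 1).foldl (fun a i_subj =>
    if PySem.List.pyGetD labels i_subj 0 = human_label then
      (PySem.List.pyRange l r 1).foldl (fun a2 i_obj =>
        if i_subj ≠ i_obj then (a2.1 ++ [[i_subj, i_obj]], a2.2 ++ [k]) else a2) a
    else a) acc

-- the enumerate loop; state = ((pair_idxes, im_idxes), idx_left, last_frame_idx)
def loopA (labels : List Int) (human_label : Int) :
    List (List Int) → Int → ((List (List Int) × List Int) × Int × Int) →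
    ((List (List Int) × List Int) × Int × Int)
  | [], _, st => st
  | bbox :: rest, idx, (acc, l, last) =>
    if PySem.List.pyGetD bbox 0 0 ≠ last then
      loopA labels human_label rest (idx + 1)
        (pairLoopA labels human_label l idx last acc, idx, PySem.List.pyGetD bbox 0 0)
    else
      loopA labels human_label rest (idx + 1) (acc, l, PySem.List.pyGetD bbox 0 0)

-- the trailing "add the last frame" block, applied to the loop's final state
def finishA (labels : List Int) (human_label : Int)
    (st : (List (List Int) × List Int) × Int × Int) (idx_right : Int) :
    List (List Int) × List Int :=
  pairLoopA labels human_label st.2.1 idx_right st.2.2 st.1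

def bbox_pair_generation (bboxes : List (List Int)) (labels : List Int) (human_label : Int) :
    List (List Int) × List Int :=
  finishA labels human_label (loopA labels human_label bboxes 0 (([], []), 0, 0))
    (bboxes.length : Int)

-- ===== PORT B =====
-- pass 1 of Source B: run.append(rid) per row, rid += 1 whenever bbox[0] != prev;
-- the sentinel prev = object() (never equal to an int) is Option Int's none
def runB : List (List Int) → Int → Option Int → List Int
  | [], _, _ => []
  | b :: rest, rid, prev =>
    if some (PySem.List.pyGetD b 0 0) = prev then rid :: runB rest rid prev
    else (rid + 1) :: runB rest (rid + 1) (some (PySem.List.pyGetD b 0 0))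

def bbox_pair_generation_alt (bboxes : List (List Int)) (labels : List Int) (human_label : Int) :
    List (List Int) × List Int :=
  let n : Int := (bboxes.length : Int)
  let run := runB bboxes (-1) none
  -- [[s,o] for s in range(n) if labels[s]==human_label for o in range(n) if run[o]==run[s] and s!=o]
  let pair_idxes :=
    (PySem.List.pyRange 0 n 1).flatMap (fun s =>
      if PySem.List.pyGetD labels s 0 = human_label then
        (PySem.List.pyRange 0 n 1).flatMap (fun o =>
          if PySem.List.pyGetD run o 0 = PySem.List.pyGetD run s 0 ∧ s ≠ o then [[s, o]] else [])
      else [])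
  -- [bboxes[p[0]][0] for p in pair_idxes]
  (pair_idxes, pair_idxes.map (fun p =>
    PySem.List.pyGetD (PySem.List.pyGetD bboxes (PySem.List.pyGetD p 0 0) []) 0 0))

-- ===== PRECONDITION & SPEC =====
-- Pre_ excludes exactly the inputs where the Python A raises: empty bboxes (UnboundLocalError: idx
-- unbound), an empty bbox row (IndexError on bbox[0]), or labels shorter than bboxes
-- (IndexError on labels[i_subj] — every index below len(bboxes) is read).
def Pre_bbox_pair_generation (bboxes : List (List Int)) (labels : List Int) (human_label : Int) : Prop :=
  bboxes ≠ [] ∧ (∀ b ∈ bboxes, b ≠ []) ∧ bboxes.length ≤ labels.length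
instance (bboxes : List (List Int)) (labels : List Int) (human_label : Int) : Decidable (Pre_bbox_pair_generation bboxes labels human_label) := by unfold Pre_bbox_pair_generation; infer_instance
def pvWitness_bbox_pair_generation : List (List Int) × List Int × Int :=
  ([[0, 1], [0, 2], [1, 3]], [0, 1, 0], 0)

-- On empty bboxes A raises UnboundLocalError (the loop variable idx is never bound); B returns ([], []).
def Raises_bbox_pair_generation (bboxes : List (List Int)) (labels : List Int) (human_label : Int) : Prop :=
  bboxes = []
instance (bboxes : List (List Int)) (labels : List Int) (human_label : Int) : Decidable (Raises_bbox_pair_generation bboxes labels human_label) := by unfold Raises_bbox_pair_generation; infer_instance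
def pvRaiseWitness_bbox_pair_generation : List (List Int) × List Int × Int := ([], [], 0)
def pvRaiseWitnessOut_bbox_pair_generation : List (List Int) × List Int := ([], [])

def Spec_bbox_pair_generation (bboxes : List (List Int)) (labels : List Int) (human_label : Int) (out : List (List Int) × List Int) : Prop := out = bbox_pair_generation_alt bboxes labels human_label
instance (bboxes : List (List Int)) (labels : List Int) (human_label : Int) (out : List (List Int) × List Int) : Decidable (Spec_bbox_pair_generation bboxes labels human_label out) := by unfold Spec_bbox_pair_generation; infer_instance

-- ===== CLAIM (what is proved, stated in full; the proofs are below) =====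
def Claim_equal_bbox_pair_generation : Prop := ∀ (bboxes : List (List Int)) (labels : List Int) (human_label : Int), Dom_bbox_pair_generation bboxes labels human_label → Pre_bbox_pair_generation bboxes labels human_label → Spec_bbox_pair_generation bboxes labels human_label (bbox_pair_generation bboxes labels human_label)
def Claim_raises_bbox_pair_generation : Prop := (∀ (bboxes : List (List Int)) (labels : List Int) (human_label : Int), Dom_bbox_pair_generation bboxes labels human_label → Raises_bbox_pair_generation bboxes labels human_label → ¬ Pre_bbox_pair_generation bboxes labels human_label) ∧ (Dom_bbox_pair_generation (pvRaiseWitness_bbox_pair_generation.1) (pvRaiseWitness_bbox_pair_generation.2.1) (pvRaiseWitness_bbox_pair_generation.2.2) ∧ Raises_bbox_pair_generation (pvRaiseWitness_bbox_pair_generation.1) (pvRaiseWitness_bbox_pair_generation.2.1) (pvRaiseWitness_bbox_pair_generation.2.2) ∧ bbox_pair_generation_alt (pvRaiseWitness_bbox_pair_generation.1) (pvRaiseWitness_bbox_pair_generation.2.1) (pvRaiseWitness_bbox_pair_generation.2.2) = pvRaiseWitnessOut_bbox_pair_generation)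

-- ===== LEMMAS AND PROOFS =====

-- Proof-side view of the frame segments: (frame value, start, end) of each maximal
-- consecutive run of equal bbox[0]; current run is (k, from l), next index i.
def segsB : Int → Int → Int → List (List Int) → List (Int × Int × Int)
  | l, i, k, [] => [(k, l, i)]
  | l, i, k, b :: rest =>
    if PySem.List.pyGetD b 0 0 = k then segsB l (i + 1) k rest
    else (k, l, i) :: segsB i (i + 1) (PySem.List.pyGetD b 0 0) rest

-- one segment's pairs
def blockPairs (labels : List Int) (human_label s e : Int) : List (List Int) :=
  (PySem.List.pyRange s e 1).flatMap (fun i_subj =>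
    if PySem.List.pyGetD labels i_subj 0 = human_label then
      (PySem.List.pyRange s e 1).flatMap (fun i_obj =>
        if i_subj ≠ i_obj then [[i_subj, i_obj]] else [])
    else [])

def applySeg (labels : List Int) (human_label : Int)
    (acc : List (List Int) × List Int) (seg : Int × Int × Int) :
    List (List Int) × List Int :=
  (acc.1 ++ blockPairs labels human_label seg.2.1 seg.2.2,
   acc.2 ++ List.replicate (blockPairs labels human_label seg.2.1 seg.2.2).length seg.1)

-- contiguity of the segments: they tile [lo, hi) in order
def chainP : List (Int × Int × Int) → Int → Int → Prop
  | [], lo, hi => lo = hi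
  | seg :: t, lo, hi => seg.2.1 = lo ∧ lo ≤ seg.2.2 ∧ chainP t seg.2.2 hi

-- which segment (by offset) an index x belongs to
def segIdx : List (Int × Int × Int) → Int → Int
  | [], _ => 0
  | seg :: t, x => if x < seg.2.2 then 0 else 1 + segIdx t x

-- the run-id list the segments induce, starting at position pos with first id rid
def runFromSegs : List (Int × Int × Int) → Int → Int → List Int
  | [], _, _ => []
  | seg :: t, rid, pos => List.replicate (seg.2.2 - pos).toNat rid ++ runFromSegs t (rid + 1) seg.2.2

-- ---- A's loop = fold of applySeg over the segments (as in the two-pass view) ----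

lemma innerFold_eq (s k : Int) (R : List Int) (acc : List (List Int) × List Int) :
    R.foldl (fun a2 o => if s ≠ o then (a2.1 ++ [[s, o]], a2.2 ++ [k]) else a2) acc
    = (acc.1 ++ R.flatMap (fun o => if s ≠ o then [[s, o]] else []),
       acc.2 ++ List.replicate (R.flatMap (fun o => if s ≠ o then [[s, o]] else [])).length k) := by
  induction R generalizing acc with
  | nil => simp
  | cons o R ih =>
    rw [List.foldl_cons, List.flatMap_cons]
    by_cases h : s ≠ o
    · rw [if_pos h, if_pos h, ih]
      simp only [List.length_cons, List.replicate_succ,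
        List.append_assoc, List.cons_append, List.nil_append]
    · rw [if_neg h, if_neg h, ih]
      simp only [List.nil_append]

lemma outerFold_eq (labels : List Int) (hl k : Int) (R0 R : List Int)
    (acc : List (List Int) × List Int) :
    R.foldl (fun a i_subj =>
      if PySem.List.pyGetD labels i_subj 0 = hl then
        R0.foldl (fun a2 i_obj =>
          if i_subj ≠ i_obj then (a2.1 ++ [[i_subj, i_obj]], a2.2 ++ [k]) else a2) a
      else a) acc
    = (acc.1 ++ R.flatMap (fun i_subj =>
         if PySem.List.pyGetD labels i_subj 0 = hl then
           R0.flatMap (fun i_obj => if i_subj ≠ i_obj then [[i_subj, i_obj]] else [])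
         else []),
       acc.2 ++ List.replicate (R.flatMap (fun i_subj =>
         if PySem.List.pyGetD labels i_subj 0 = hl then
           R0.flatMap (fun i_obj => if i_subj ≠ i_obj then [[i_subj, i_obj]] else [])
         else [])).length k) := by
  induction R generalizing acc with
  | nil => simp
  | cons s R ih =>
    rw [List.foldl_cons, List.flatMap_cons]
    by_cases h : PySem.List.pyGetD labels s 0 = hl
    · rw [if_pos h, if_pos h, innerFold_eq, ih]
      simp only [List.append_assoc, List.length_append, List.replicate_add]
    · rw [if_neg h, if_neg h, ih]
      simp only [List.nil_append]

lemma pairLoopA_eq_applySeg (labels : List Int) (hl l r k : Int)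
    (acc : List (List Int) × List Int) :
    pairLoopA labels hl l r k acc = applySeg labels hl acc (k, l, r) := by
  unfold pairLoopA applySeg blockPairs
  exact outerFold_eq labels hl k (PySem.List.pyRange l r 1) (PySem.List.pyRange l r 1) acc

lemma pairLoopA_self (labels : List Int) (hl l k : Int) (acc : List (List Int) × List Int) :
    pairLoopA labels hl l l k acc = acc := by
  simp [pairLoopA, PySem.List.pyRange_one_eq_nil le_rfl]

-- main A-side invariant: running A's loop from state (acc, l, k) at index i and then the
-- trailing block equals folding applySeg over the segments of the rest
lemma loopA_segs (labels : List Int) (hl : Int) (ys : List (List Int)) :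
    ∀ (i l k : Int) (acc : List (List Int) × List Int),
      finishA labels hl (loopA labels hl ys i (acc, l, k)) (i + ys.length)
      = (segsB l i k ys).foldl (applySeg labels hl) acc := by
  induction ys with
  | nil =>
    intro i l k acc
    simp only [loopA, segsB, finishA, List.length_nil, Int.natCast_zero, add_zero,
      List.foldl_cons, List.foldl_nil]
    exact pairLoopA_eq_applySeg labels hl l i k acc
  | cons b rest ih =>
    intro i l k acc
    have hlen : i + (((b :: rest).length : Nat) : Int) = (i + 1) + (rest.length : Int) := by
      simp only [List.length_cons]; push_cast; ring
    rw [hlen]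
    by_cases h : PySem.List.pyGetD b 0 0 = k
    · simpa [loopA, segsB, h] using ih (i + 1) l k acc
    · simp only [loopA, segsB, if_pos h, if_neg h, List.foldl_cons,
        pairLoopA_eq_applySeg]
      exact ih (i + 1) i (PySem.List.pyGetD b 0 0) _

lemma foldl_applySeg (labels : List Int) (hl : Int) (segs : List (Int × Int × Int)) :
    ∀ acc, segs.foldl (applySeg labels hl) acc
      = (acc.1 ++ segs.flatMap (fun g => blockPairs labels hl g.2.1 g.2.2),
         acc.2 ++ segs.flatMap (fun g =>
           List.replicate (blockPairs labels hl g.2.1 g.2.2).length g.1)) := by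
  induction segs with
  | nil => intro acc; simp
  | cons g t ih =>
    intro acc
    rw [List.foldl_cons, ih]
    simp [applySeg, List.append_assoc]

-- ---- basic structure of segsB ----

lemma segsB_head (ys : List (List Int)) :
    ∀ (l i k : Int), ∃ r t, segsB l i k ys = (k, l, r) :: t ∧ i ≤ r := by
  induction ys with
  | nil => intro l i k; exact ⟨i, [], rfl, le_rfl⟩
  | cons b rest ih =>
    intro l i k
    by_cases h : PySem.List.pyGetD b 0 0 = k
    · obtain ⟨r, t, he, hr⟩ := ih l (i + 1) k
      exact ⟨r, t, by simp [segsB, h, he], by omega⟩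
    · exact ⟨i, segsB i (i + 1) (PySem.List.pyGetD b 0 0) rest, by simp [segsB, h], le_rfl⟩

lemma segsB_chain (ys : List (List Int)) :
    ∀ (l i k : Int), l ≤ i → chainP (segsB l i k ys) l (i + ys.length) := by
  induction ys with
  | nil =>
    intro l i k h
    simp only [segsB, List.length_nil, Int.natCast_zero, add_zero]
    exact ⟨rfl, h, rfl⟩
  | cons b rest ih =>
    intro l i k h
    have hlen : i + (((b :: rest).length : Nat) : Int) = (i + 1) + (rest.length : Int) := by
      simp only [List.length_cons]; push_cast; ring
    rw [hlen]
    by_cases hv : PySem.List.pyGetD b 0 0 = k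
    · simpa [segsB, hv] using ih l (i + 1) k (by omega)
    · simp only [segsB, if_neg hv]
      exact ⟨rfl, h, ih i (i + 1) _ (by omega)⟩

lemma chainP_le (segs : List (Int × Int × Int)) :
    ∀ lo hi, chainP segs lo hi → lo ≤ hi := by
  induction segs with
  | nil => intro lo hi h; exact le_of_eq h
  | cons g t ih =>
    intro lo hi h
    obtain ⟨-, h1, h2⟩ := h
    exact le_trans h1 (ih _ _ h2)

lemma segIdx_nonneg (segs : List (Int × Int × Int)) (x : Int) : 0 ≤ segIdx segs x := by
  induction segs with
  | nil => simp [segIdx]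
  | cons g t ih => simp only [segIdx]; split_ifs <;> omega

-- ---- the run-id list: runB equals runFromSegs of the segments ----

lemma runFromSegs_cons_pos (k l r rid pos : Int) (t : List (Int × Int × Int)) (h : pos < r) :
    runFromSegs ((k, l, r) :: t) rid pos = rid :: runFromSegs ((k, l, r) :: t) rid (pos + 1) := by
  simp only [runFromSegs]
  have : (r - pos).toNat = (r - (pos + 1)).toNat + 1 := by omega
  rw [this, List.replicate_succ, List.cons_append]

lemma runB_eq_runFromSegs (ys : List (List Int)) :
    ∀ (rid k l i : Int), runB ys rid (some k) = runFromSegs (segsB l i k ys) rid i := by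
  induction ys with
  | nil => intro rid k l i; simp [runB, segsB, runFromSegs]
  | cons b rest ih =>
    intro rid k l i
    by_cases hv : PySem.List.pyGetD b 0 0 = k
    · obtain ⟨r, t, he, hr⟩ := segsB_head rest l (i + 1) k
      have h1 : runB (b :: rest) rid (some k) = rid :: runB rest rid (some k) := by
        simp [runB, hv]
      have h2 : segsB l i k (b :: rest) = segsB l (i + 1) k rest := by simp [segsB, hv]
      rw [h1, h2, ih rid k l (i + 1), he, runFromSegs_cons_pos k l r rid i t (by omega)]
    · obtain ⟨r, t, he, hr⟩ := segsB_head rest i (i + 1) (PySem.List.pyGetD b 0 0)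
      have h1 : runB (b :: rest) rid (some k)
          = (rid + 1) :: runB rest (rid + 1) (some (PySem.List.pyGetD b 0 0)) := by
        simp [runB, hv]
      have h2 : segsB l i k (b :: rest)
          = (k, l, i) :: segsB i (i + 1) (PySem.List.pyGetD b 0 0) rest := by
        simp [segsB, hv]
      have h3 : runFromSegs ((k, l, i) :: segsB i (i + 1) (PySem.List.pyGetD b 0 0) rest) rid i
          = runFromSegs (segsB i (i + 1) (PySem.List.pyGetD b 0 0) rest) (rid + 1) i := by
        simp [runFromSegs]
      rw [h1, h2, h3, he, runFromSegs_cons_pos _ _ r (rid + 1) i t (by omega),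
          ih (rid + 1) (PySem.List.pyGetD b 0 0) i (i + 1), he]

lemma length_runFromSegs (segs : List (Int × Int × Int)) :
    ∀ lo hi rid, chainP segs lo hi → (runFromSegs segs rid lo).length = (hi - lo).toNat := by
  induction segs with
  | nil => intro lo hi rid h; simp [runFromSegs, chainP] at h ⊢; omega
  | cons g t ih =>
    intro lo hi rid h
    obtain ⟨h1, h2, h3⟩ := h
    have hle := chainP_le t _ _ h3
    simp only [runFromSegs, List.length_append, List.length_replicate, ih _ _ (rid + 1) h3]
    omega

-- lookup in the run list: run[x] = rid + (segment offset of x)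
lemma runFromSegs_lookup (segs : List (Int × Int × Int)) :
    ∀ lo hi rid x, chainP segs lo hi → lo ≤ x → x < hi →
      PySem.List.pyGetD (runFromSegs segs rid lo) (x - lo) 0 = rid + segIdx segs x := by
  induction segs with
  | nil => intro lo hi rid x h hx1 hx2; simp [chainP] at h; omega
  | cons g t ih =>
    intro lo hi rid x h hx1 hx2
    obtain ⟨h1, h2, h3⟩ := h
    have hle := chainP_le t _ _ h3
    by_cases hx : x < g.2.2
    · have hch : chainP (g :: t) lo hi := ⟨h1, h2, h3⟩
      have hlen : (runFromSegs (g :: t) rid lo).length = (hi - lo).toNat :=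
        length_runFromSegs _ _ _ _ hch
      rw [PySem.List.pyGetD_eq_getElem _ _ (by omega) (by rw [hlen]; omega)]
      simp only [runFromSegs]
      rw [List.getElem_append_left (by simp; omega)]
      simp [segIdx, hx]
    · have hch : chainP (g :: t) lo hi := ⟨h1, h2, h3⟩
      have hlen : (runFromSegs (g :: t) rid lo).length = (hi - lo).toNat :=
        length_runFromSegs _ _ _ _ hch
      have hlen2 : (runFromSegs t (rid + 1) g.2.2).length = (hi - g.2.2).toNat :=
        length_runFromSegs _ _ _ _ h3
      have hstep : PySem.List.pyGetD (runFromSegs (g :: t) rid lo) (x - lo) 0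
          = PySem.List.pyGetD (runFromSegs t (rid + 1) g.2.2) (x - g.2.2) 0 := by
        rw [PySem.List.pyGetD_eq_getElem _ _ (by omega) (by rw [hlen]; omega),
            PySem.List.pyGetD_eq_getElem _ _ (by omega) (by rw [hlen2]; omega)]
        simp only [runFromSegs]
        rw [List.getElem_append_right (by simp; omega)]
        congr 1
        simp
        omega
      rw [hstep, ih _ _ (rid + 1) x h3 (by omega) hx2]
      simp only [segIdx, if_neg hx]
      ring

-- ---- B's double comprehension collapses to the per-segment pairs ----

lemma flatMap_nil_of_forall {α β : Type} (l : List α) (f : α → List β)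
    (h : ∀ a ∈ l, f a = []) : l.flatMap f = [] := by
  simp [List.flatMap_eq_nil_iff]; exact h

lemma flatMap_congr_mem {α β : Type} (l : List α) (f g : α → List β)
    (h : ∀ a ∈ l, f a = g a) : l.flatMap f = l.flatMap g := by
  induction l with
  | nil => rfl
  | cons a t ih =>
    simp only [List.flatMap_cons]
    rw [h a (by simp), ih (fun a ha => h a (by simp [ha]))]

lemma pairs_main (labels : List Int) (hl n : Int) (run : List Int)
    (segs : List (Int × Int × Int)) :
    ∀ lo rid, 0 ≤ lo → chainP segs lo n →
      (∀ x, lo ≤ x → x < n → PySem.List.pyGetD run x 0 = rid + segIdx segs x) →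
      (∀ x, 0 ≤ x → x < lo → PySem.List.pyGetD run x 0 < rid) →
      (PySem.List.pyRange lo n 1).flatMap (fun s =>
        if PySem.List.pyGetD labels s 0 = hl then
          (PySem.List.pyRange 0 n 1).flatMap (fun o =>
            if PySem.List.pyGetD run o 0 = PySem.List.pyGetD run s 0 ∧ s ≠ o then [[s, o]] else [])
        else [])
      = segs.flatMap (fun g => blockPairs labels hl g.2.1 g.2.2) := by
  induction segs with
  | nil =>
    intro lo rid hlo hch H1 H2
    simp only [chainP] at hch
    subst hch
    simp [PySem.List.pyRange_one_eq_nil le_rfl]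
  | cons g t ih =>
    intro lo rid hlo hch H1 H2
    obtain ⟨h1, h2, h3⟩ := hch
    have hrn : g.2.2 ≤ n := chainP_le t _ _ h3
    -- run values inside the head segment are rid
    have Hseg : ∀ x, lo ≤ x → x < g.2.2 → PySem.List.pyGetD run x 0 = rid := by
      intro x hx1 hx2
      rw [H1 x hx1 (by omega)]
      simp [segIdx, hx2]
    -- run values beyond the head segment exceed rid
    have Hgt : ∀ x, g.2.2 ≤ x → x < n → rid < PySem.List.pyGetD run x 0 := by
      intro x hx1 hx2
      rw [H1 x (by omega) hx2]
      have := segIdx_nonneg t x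
      simp only [segIdx, if_neg (by omega : ¬ x < g.2.2)]
      omega
    rw [PySem.List.pyRange_one_append lo g.2.2 n h2 hrn, List.flatMap_append,
        List.flatMap_cons]
    congr 1
    · -- head segment: the inner range(0,n) collapses to range(lo, g.2.2)
      rw [show blockPairs labels hl g.2.1 g.2.2 = blockPairs labels hl lo g.2.2 by rw [h1]]
      unfold blockPairs
      apply flatMap_congr_mem
      intro s hs
      rw [PySem.List.mem_pyRange_one] at hs
      by_cases hlab : PySem.List.pyGetD labels s 0 = hl
      · rw [if_pos hlab, if_pos hlab]
        rw [PySem.List.pyRange_one_append 0 lo n hlo (by omega), List.flatMap_append,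
            PySem.List.pyRange_one_append lo g.2.2 n h2 hrn, List.flatMap_append]
        rw [flatMap_nil_of_forall (PySem.List.pyRange 0 lo 1) _ (by
              intro o ho
              rw [PySem.List.mem_pyRange_one] at ho
              have := H2 o ho.1 ho.2
              rw [if_neg (by rw [Hseg s hs.1 hs.2]; omega)]),
            flatMap_nil_of_forall (PySem.List.pyRange g.2.2 n 1) _ (by
              intro o ho
              rw [PySem.List.mem_pyRange_one] at ho
              have := Hgt o ho.1 ho.2
              rw [if_neg (by rw [Hseg s hs.1 hs.2]; omega)])]
        simp only [List.nil_append, List.append_nil]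
        apply flatMap_congr_mem
        intro o ho
        rw [PySem.List.mem_pyRange_one] at ho
        rw [Hseg o ho.1 ho.2, Hseg s hs.1 hs.2]
        simp
      · rw [if_neg hlab, if_neg hlab]
    · -- tail segments
      exact ih g.2.2 (rid + 1) (by omega) h3
        (fun x hx1 hx2 => by
          rw [H1 x (by omega) hx2]
          simp only [segIdx, if_neg (by omega : ¬ x < g.2.2)]
          ring)
        (fun x hx1 hx2 => by
          by_cases hxlo : x < lo
          · have := H2 x hx1 hxlo
            omega
          · have := Hseg x (by omega) hx2
            omega)

-- ---- segment frame values really are bboxes[x][0] on their range ----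

lemma pyGetD_cons_of_pos {α : Type} (a : α) (t : List α) (j : Int) (d : α) (h : 1 ≤ j) :
    PySem.List.pyGetD (a :: t) j d = PySem.List.pyGetD t (j - 1) d := by
  by_cases hj : j < (t.length : Int) + 1
  · rw [PySem.List.pyGetD_eq_getElem _ _ (by omega) (by simp; omega),
        PySem.List.pyGetD_eq_getElem _ _ (by omega) (by omega)]
    have hjt : j.toNat = (j - 1).toNat + 1 := by omega
    simp only [hjt, List.getElem_cons_succ]
  · simp only [PySem.List.pyGetD]
    rw [(PySem.List.pyGet?_eq_none_iff _ _).2 (by unfold PySem.Raise.InRange; simp; omega),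
        (PySem.List.pyGet?_eq_none_iff _ _).2 (by unfold PySem.Raise.InRange; simp; omega)]

def segsOK (bboxes : List (List Int)) (segs : List (Int × Int × Int)) : Prop :=
  ∀ g ∈ segs, ∀ x, g.2.1 ≤ x → x < g.2.2 →
    PySem.List.pyGetD (PySem.List.pyGetD bboxes x []) 0 0 = g.1

lemma segsB_ok (bboxes : List (List Int)) (ys : List (List Int)) :
    ∀ (l i k : Int),
      (∀ x, i ≤ x → x < i + ys.length →
        PySem.List.pyGetD bboxes x [] = PySem.List.pyGetD ys (x - i) []) →
      (∀ x, l ≤ x → x < i → PySem.List.pyGetD (PySem.List.pyGetD bboxes x []) 0 0 = k) →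
      segsOK bboxes (segsB l i k ys) := by
  induction ys with
  | nil =>
    intro l i k _ hk
    intro g hg x hx1 hx2
    simp only [segsB, List.mem_singleton] at hg
    subst hg
    exact hk x hx1 hx2
  | cons b rest ih =>
    intro l i k hs hk
    have hbi : PySem.List.pyGetD bboxes i [] = b := by
      have h := hs i le_rfl (by simp only [List.length_cons]; push_cast; omega)
      rw [show i - i = (0 : Int) by omega, PySem.List.pyGetD_zero_cons] at h
      exact h
    have hs' : ∀ x, i + 1 ≤ x → x < (i + 1) + (rest.length : Int) →
        PySem.List.pyGetD bboxes x [] = PySem.List.pyGetD rest (x - (i + 1)) [] := by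
      intro x hx1 hx2
      rw [hs x (by omega) (by simp; push_cast; omega),
          pyGetD_cons_of_pos b rest (x - i) [] (by omega)]
      congr 1
      omega
    by_cases hv : PySem.List.pyGetD b 0 0 = k
    · rw [show segsB l i k (b :: rest) = segsB l (i + 1) k rest by simp [segsB, hv]]
      apply ih l (i + 1) k hs'
      intro x hx1 hx2
      by_cases hxi : x < i
      · exact hk x hx1 hxi
      · rw [show x = i by omega, hbi, hv]
    · rw [show segsB l i k (b :: rest)
          = (k, l, i) :: segsB i (i + 1) (PySem.List.pyGetD b 0 0) rest by simp [segsB, hv]]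
      intro g hg
      rcases List.mem_cons.mp hg with hg | hg
      · subst hg
        exact fun x hx1 hx2 => hk x hx1 hx2
      · refine ih i (i + 1) (PySem.List.pyGetD b 0 0) hs' ?_ g hg
        intro x hx1 hx2
        rw [show x = i by omega, hbi]

-- every pair in a segment's block is [s, o] with s in the segment's range
lemma mem_blockPairs (labels : List Int) (hl l r : Int) (p : List Int)
    (hp : p ∈ blockPairs labels hl l r) : ∃ s o, p = [s, o] ∧ l ≤ s ∧ s < r := by
  unfold blockPairs at hp
  rw [List.mem_flatMap] at hp
  obtain ⟨s, hs, hp⟩ := hp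
  rw [PySem.List.mem_pyRange_one] at hs
  split_ifs at hp
  · rw [List.mem_flatMap] at hp
    obtain ⟨o, -, hp⟩ := hp
    split_ifs at hp
    · simp only [List.mem_singleton] at hp
      exact ⟨s, o, hp, hs.1, hs.2⟩
    · simp at hp
  · simp at hp

-- ===== VERDICT (by name: the statement is the Claim_ definition above) =====
theorem bbox_pair_generation_spec : Claim_equal_bbox_pair_generation := by
  intro bboxes labels hl _ hpre
  unfold Spec_bbox_pair_generation
  obtain ⟨hne, -, -⟩ := hpre
  cases bboxes with
  | nil => exact absurd rfl hne
  | cons b rest =>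
    have hn : (((b :: rest).length : Nat) : Int) = 1 + (rest.length : Int) := by
      simp only [List.length_cons]; push_cast; ring
    obtain ⟨r0, t0, hhead, hr0⟩ := segsB_head rest 0 1 (PySem.List.pyGetD b 0 0)
    have hch : chainP (segsB 0 1 (PySem.List.pyGetD b 0 0) rest) 0 (1 + (rest.length : Int)) :=
      segsB_chain rest 0 1 (PySem.List.pyGetD b 0 0) (by omega)
    -- the run list Source B builds equals the segment-induced one
    have hrun : runB (b :: rest) (-1) none
        = runFromSegs (segsB 0 1 (PySem.List.pyGetD b 0 0) rest) 0 0 := by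
      have h1 : runB (b :: rest) (-1) none
          = 0 :: runB rest 0 (some (PySem.List.pyGetD b 0 0)) := by
        simp [runB]
      rw [h1, runB_eq_runFromSegs rest 0 (PySem.List.pyGetD b 0 0) 0 1, hhead,
          runFromSegs_cons_pos _ 0 r0 0 0 t0 (by omega)]
      norm_num
    -- run lookups inside [0, n)
    have H1 : ∀ x, 0 ≤ x → x < 1 + (rest.length : Int) →
        PySem.List.pyGetD (runFromSegs (segsB 0 1 (PySem.List.pyGetD b 0 0) rest) 0 0) x 0
        = 0 + segIdx (segsB 0 1 (PySem.List.pyGetD b 0 0) rest) x := by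
      intro x hx1 hx2
      have := runFromSegs_lookup (segsB 0 1 (PySem.List.pyGetD b 0 0) rest)
        0 (1 + (rest.length : Int)) 0 x hch hx1 hx2
      simpa using this
    -- B's pair list collapses to the per-segment pairs
    have hpairs :
        (PySem.List.pyRange 0 (1 + (rest.length : Int)) 1).flatMap (fun s =>
          if PySem.List.pyGetD labels s 0 = hl then
            (PySem.List.pyRange 0 (1 + (rest.length : Int)) 1).flatMap (fun o =>
              if PySem.List.pyGetD (runB (b :: rest) (-1) none) o 0
                  = PySem.List.pyGetD (runB (b :: rest) (-1) none) s 0 ∧ s ≠ o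
              then [[s, o]] else [])
          else [])
        = (segsB 0 1 (PySem.List.pyGetD b 0 0) rest).flatMap
            (fun g => blockPairs labels hl g.2.1 g.2.2) := by
      rw [hrun]
      exact pairs_main labels hl (1 + (rest.length : Int)) _ _ 0 0 le_rfl hch H1
        (fun x hx1 hx2 => absurd hx2 (by omega))
    -- the segment frame values are bboxes[x][0] on their ranges
    have hok : segsOK (b :: rest) (segsB 0 1 (PySem.List.pyGetD b 0 0) rest) := by
      apply segsB_ok (b :: rest) rest 0 1 (PySem.List.pyGetD b 0 0)
      · intro x hx1 hx2
        rw [pyGetD_cons_of_pos b rest x [] (by omega)]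
      · intro x hx1 hx2
        rw [show x = (0 : Int) by omega, PySem.List.pyGetD_zero_cons]
    -- A's result as the two per-segment concatenations
    have hA : bbox_pair_generation (b :: rest) labels hl
        = ((segsB 0 1 (PySem.List.pyGetD b 0 0) rest).flatMap
             (fun g => blockPairs labels hl g.2.1 g.2.2),
           (segsB 0 1 (PySem.List.pyGetD b 0 0) rest).flatMap
             (fun g => List.replicate (blockPairs labels hl g.2.1 g.2.2).length g.1)) := by
      have hfirst : loopA labels hl (b :: rest) 0 (([], []), 0, 0)
          = loopA labels hl rest 1 (([], []), 0, PySem.List.pyGetD b 0 0) := by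
        by_cases h : PySem.List.pyGetD b 0 0 = (0 : Int)
        · simp [loopA, h]
        · simp [loopA, h, pairLoopA_self]
      unfold bbox_pair_generation
      rw [hfirst, hn, loopA_segs, foldl_applySeg]
      simp
    -- B's im_idxes list is the per-segment replicate concatenation
    have hmap :
        ((segsB 0 1 (PySem.List.pyGetD b 0 0) rest).flatMap
            (fun g => blockPairs labels hl g.2.1 g.2.2)).map
          (fun p => PySem.List.pyGetD
            (PySem.List.pyGetD (b :: rest) (PySem.List.pyGetD p 0 0) []) 0 0)
        = (segsB 0 1 (PySem.List.pyGetD b 0 0) rest).flatMap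
            (fun g => List.replicate (blockPairs labels hl g.2.1 g.2.2).length g.1) := by
      rw [List.map_flatMap]
      apply flatMap_congr_mem
      intro g hg
      rw [List.eq_replicate_iff]
      refine ⟨by simp, ?_⟩
      intro y hy
      rw [List.mem_map] at hy
      obtain ⟨p, hp, rfl⟩ := hy
      obtain ⟨si, oi, rfl, hs1, hs2⟩ := mem_blockPairs labels hl g.2.1 g.2.2 p hp
      simp only [PySem.List.pyGetD_zero_cons]
      exact hok g hg si hs1 hs2
    rw [hA]
    simp only [bbox_pair_generation_alt]
    rw [hn, hpairs, hmap]

@[simp]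
theorem bbox_pair_generation_raises : Claim_raises_bbox_pair_generation := by
  unfold Claim_raises_bbox_pair_generation
  exact ⟨fun bboxes labels hl _ hr hp => hp.1 hr, by decide⟩
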